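-- pv_equiv track=rewrite | github.com/sunilsoni/interview-notes-python | com/interview/2024/oct/test1/queries.py | solution
-- ===== SOURCE A (Python) =====
-- def solution(houses, queries):
--     # Sort houses for efficient processing
--     houses.sort()
--
--     # Create a set for quick lookup and removal
--     house_set = set(houses)
--
--     # Initialize segments
--     segments = count_segments(houses)
--
--     result = []
--     for query in queries:
--         # Remove the house
--         house_set.remove(query)
--
--         # Update segments
--         left = query - 1 in house_set
--         right = query + 1 in house_set
--
--         if left and right:
--             segments += 1
--         elif not left and not right:
--             segments -= 1
--
--         result.append(segments)
--
--     return result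
--
-- def count_segments(houses):
--     if not houses:
--         return 0
--
--     segments = 1
--     for i in range(1, len(houses)):
--         if houses[i] - houses[i - 1] > 1:
--             segments += 1
--
--     return segments
-- ===== SOURCE B (Python) =====
-- def solution(houses, queries):
--     # same in-place mutation as A (observable side effect); the value does not depend on it
--     houses.sort()
--
--     # offline, in reverse: perform ALL removals first, ...
--     alive = set(houses)
--     for q in queries:
--         alive.remove(q)
--
--     # ... count the final state's segments by set pairing, ...
--     segments = len(alive) - sum(1 for x in alive if x + 1 in alive)
--
--     # ... then add the houses back, back-to-front, recording the count before each addition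
--     res = []
--     for q in reversed(queries):
--         res.append(segments)
--         segments += 1 - (q - 1 in alive) - (q + 1 in alive)
--         alive.add(q)
--     res.reverse()
--     return res
-- ===== Notes on version B (the rewrite author's own statement) =====
-- stated objective: alternative
-- what changed: B answers the queries OFFLINE IN REVERSE: it first performs all removals to reach the final state, counts that state's segments by set pairing (size minus x with x+1 present), then re-ADDS the queried houses back-to-front, recording the running count before each addition and reversing the record, instead of A's forward removal loop seeded by a sorted-scan count with a per-query branch ladder.
import Mathlib
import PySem

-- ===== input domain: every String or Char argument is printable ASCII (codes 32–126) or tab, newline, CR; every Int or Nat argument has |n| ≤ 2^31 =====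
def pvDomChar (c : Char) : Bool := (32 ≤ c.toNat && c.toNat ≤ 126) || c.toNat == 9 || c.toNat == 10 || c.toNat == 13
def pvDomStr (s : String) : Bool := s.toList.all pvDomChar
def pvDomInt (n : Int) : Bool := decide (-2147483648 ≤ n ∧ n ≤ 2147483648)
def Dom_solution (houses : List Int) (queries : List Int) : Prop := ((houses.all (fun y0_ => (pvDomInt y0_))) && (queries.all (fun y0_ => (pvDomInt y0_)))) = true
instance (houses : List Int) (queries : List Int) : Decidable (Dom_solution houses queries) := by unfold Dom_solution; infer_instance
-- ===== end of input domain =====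

-- B answers the queries OFFLINE IN REVERSE: it starts from the final state (houses minus all
-- queries), counts its segments by set pairing, then re-ADDS the queried houses back-to-front,
-- recording the running count and reversing the record (alternative decomposition, same cost).
-- A mutates `houses` in place via houses.sort(); B performs the same sort, and the equivalence
-- proved here is about the return value.

-- ===== PORT A =====
def countSegments (houses : List Int) : Int :=
  if houses = [] then 0
  else
    (PySem.List.pyRange 1 (PySem.List.len houses) 1).foldl
      (fun segments i =>
        if PySem.List.pyGetD houses i 0 - PySem.List.pyGetD houses (i - 1) 0 > 1 then
          segments + 1
        else segments)
      1

def solutionStep (st : PySem.Set Int × Int × List Int) (query : Int) :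
    PySem.Set Int × Int × List Int :=
  match PySem.Set.remove? st.1 query with
  | none => st   -- Python raises KeyError here; Pre_solution excludes these inputs
  | some houseSet =>
    let left := PySem.Set.contains houseSet (query - 1)
    let right := PySem.Set.contains houseSet (query + 1)
    let segments :=
      if left && right then st.2.1 + 1
      else if !left && !right then st.2.1 - 1
      else st.2.1
    (houseSet, segments, st.2.2 ++ [segments])

def solution (houses : List Int) (queries : List Int) : List Int :=
  let sortedHouses := PySem.List.sorted houses (fun x => x) false
  let houseSet := PySem.Set.ofList sortedHouses
  let segments := countSegments sortedHouses
  (queries.foldl solutionStep (houseSet, segments, [])).2.2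

-- ===== PORT B =====
def solutionAltStep (st : PySem.Set Int × Int × List Int) (q : Int) :
    PySem.Set Int × Int × List Int :=
  let res := st.2.2 ++ [st.2.1]
  let segments := st.2.1 +
    (1 - (if PySem.Set.contains st.1 (q - 1) then 1 else 0)
       - (if PySem.Set.contains st.1 (q + 1) then 1 else 0))
  (PySem.Set.add st.1 q, segments, res)

def solution_alt (houses : List Int) (queries : List Int) : List Int :=
  -- Source B's houses.sort() only mutates the argument in place; the value never reads the order
  let alive := queries.foldl (fun s q =>
    match PySem.Set.remove? s q with
    | none => s   -- Python raises KeyError here; Pre_solution excludes these inputs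
    | some t => t) (PySem.Set.ofList houses)
  -- sum(1 for x in alive if x + 1 in alive): a count over the set, order-independent
  let segments := PySem.Set.len alive -
    alive.foldl (fun acc x => if PySem.Set.contains alive (x + 1) then acc + 1 else acc) 0
  let st := queries.reverse.foldl solutionAltStep (alive, segments, [])
  st.2.2.reverse

-- ===== PRECONDITION & SPEC =====
-- Pre_ excludes exactly the inputs on which A's house_set.remove(query) raises KeyError
-- (a repeated query, or a query that is not a house); B's alive.remove(q) raises there as well.
def Pre_solution (houses : List Int) (queries : List Int) : Prop :=
  queries.Nodup ∧ ∀ q ∈ queries, q ∈ houses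
instance (houses : List Int) (queries : List Int) : Decidable (Pre_solution houses queries) := by
  unfold Pre_solution; infer_instance

def pvWitness_solution : List Int × List Int := ([4, 1, 2, 7, 8], [2, 8, 4])

def Spec_solution (houses : List Int) (queries : List Int) (out : List Int) : Prop :=
  out = solution_alt houses queries
instance (houses : List Int) (queries : List Int) (out : List Int) :
    Decidable (Spec_solution houses queries out) := by unfold Spec_solution; infer_instance

-- ===== CLAIM (what is proved, stated in full; the proofs are below) =====
def Claim_equal_solution : Prop := ∀ (houses : List Int) (queries : List Int),
  Dom_solution houses queries → Pre_solution houses queries →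
  Spec_solution houses queries (solution houses queries)

-- ===== LEMMAS AND PROOFS =====

-- segment count of a set of houses given as a nodup list: size minus adjacent pairs
def fseg (l : List Int) : Int :=
  (l.length : Int) - (l.countP (fun x => decide ((x + 1) ∈ l)) : Int)

theorem contains_eq_decide (s : PySem.Set Int) (x : Int) :
    PySem.Set.contains s x = decide (x ∈ s) := by
  simp

theorem fseg_perm {l l' : List Int} (h : l.Perm l') : fseg l = fseg l' := by
  unfold fseg
  have h1 : l.countP (fun x => decide ((x + 1) ∈ l)) =
      l.countP (fun x => decide ((x + 1) ∈ l')) :=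
    List.countP_congr (fun x _ => by simp only [decide_eq_true_eq]; exact h.mem_iff)
  rw [h1, h.countP_eq, h.length_eq]

-- adding a fresh house q to a nodup list of houses changes fseg by 1 - [q-1 ∈ S] - [q+1 ∈ S]
theorem fseg_append (S : List Int) (q : Int) (hnd : S.Nodup) (hq : q ∉ S) :
    fseg (S ++ [q]) = fseg S +
      (1 - (if q - 1 ∈ S then 1 else 0) - (if q + 1 ∈ S then 1 else 0)) := by
  have key : ∀ x : Int, x ≠ q - 1 →
      (decide ((x + 1) ∈ S ++ [q])) = (decide ((x + 1) ∈ S)) := by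
    intro x hx
    rw [decide_eq_decide]
    simp only [List.mem_append, List.mem_singleton]
    constructor
    · rintro (h | h)
      · exact h
      · exact absurd h (by omega)
    · exact Or.inl
  have hcntS : S.countP (fun x => decide ((x + 1) ∈ S ++ [q])) =
      S.countP (fun x => decide ((x + 1) ∈ S)) + (if q - 1 ∈ S then 1 else 0) := by
    by_cases hq1 : q - 1 ∈ S
    · have hperm : S.Perm ((q - 1) :: S.erase (q - 1)) := List.perm_cons_erase hq1
      rw [hperm.countP_eq, hperm.countP_eq, List.countP_cons, List.countP_cons]
      have h1 : (decide ((q - 1 + 1) ∈ S ++ [q])) = true := by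
        have hqq : q - 1 + 1 = q := by ring
        simp [hqq]
      have h2 : (decide ((q - 1 + 1) ∈ S)) = false := by
        have hqq : q - 1 + 1 = q := by ring
        simp [hqq, hq]
      have h3 : (S.erase (q - 1)).countP (fun x => decide ((x + 1) ∈ S ++ [q])) =
          (S.erase (q - 1)).countP (fun x => decide ((x + 1) ∈ S)) :=
        List.countP_congr (fun x hx => by rw [key x ((List.Nodup.mem_erase_iff hnd).1 hx).1])
      rw [h1, h2, h3, if_pos hq1]
      simp
    · rw [List.countP_congr (fun x hx => by rw [key x (fun hc => hq1 (hc ▸ hx))]), if_neg hq1]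
      simp
  have h4 : [q].countP (fun x => decide ((x + 1) ∈ S ++ [q])) =
      (if q + 1 ∈ S then 1 else 0) := by
    rw [List.countP_cons, List.countP_nil, key q (by omega)]
    by_cases h : q + 1 ∈ S <;> simp [h]
  unfold fseg
  rw [List.countP_append, hcntS, h4, List.length_append]
  by_cases h1 : q - 1 ∈ S <;> by_cases h2 : q + 1 ∈ S <;>
    simp [h1, h2] <;> omega

-- removing a present house q (A's direction), phrased via Set.discard
theorem fseg_discard (S : PySem.Set Int) (q : Int) (hnd : S.Nodup) (hq : q ∈ S) :
    fseg S = fseg (PySem.Set.discard S q) +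
      (1 - (if q - 1 ∈ PySem.Set.discard S q then 1 else 0)
         - (if q + 1 ∈ PySem.Set.discard S q then 1 else 0)) := by
  have hdnd : (PySem.Set.discard S q).Nodup := PySem.Set.nodup_discard S q hnd
  have hqd : q ∉ PySem.Set.discard S q := by
    intro hc; exact ((PySem.Set.mem_discard S q q).1 hc).2 rfl
  have hperm : S.Perm (PySem.Set.discard S q ++ [q]) := by
    refine (List.perm_ext_iff_of_nodup hnd ?_).2 ?_
    · exact List.Nodup.append hdnd (List.nodup_singleton q)
        (fun a ha hb => hqd ((List.mem_singleton.1 hb) ▸ ha))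
    · intro a
      simp only [List.mem_append, List.mem_singleton, PySem.Set.mem_discard S q a]
      constructor
      · intro ha; by_cases h : a = q; exacts [Or.inr h, Or.inl ⟨ha, h⟩]
      · rintro (⟨ha, _⟩ | rfl); exacts [ha, hq]
  rw [fseg_perm hperm, fseg_append _ _ hdnd hqd]

-- the sequence of segment counts produced by removing the queries one by one
def trace : PySem.Set Int → List Int → List Int
  | _, [] => []
  | S, q :: qs => fseg (PySem.Set.discard S q) :: trace (PySem.Set.discard S q) qs

-- A's forward loop outputs exactly `trace`
theorem aLoop (qs : List Int) (S : PySem.Set Int) (acc : List Int)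
    (hnd : S.Nodup) (hqnd : qs.Nodup) (hsub : ∀ q ∈ qs, q ∈ S) :
    (qs.foldl solutionStep (S, fseg S, acc)).2.2 = acc ++ trace S qs := by
  induction qs generalizing S acc with
  | nil => simp [trace]
  | cons q qs ih =>
    have hqS : q ∈ S := hsub q (by simp)
    have hd := fseg_discard S q hnd hqS
    have hstep : solutionStep (S, fseg S, acc) q =
        (PySem.Set.discard S q, fseg (PySem.Set.discard S q),
          acc ++ [fseg (PySem.Set.discard S q)]) := by
      by_cases hl : q - 1 ∈ PySem.Set.discard S q <;>
        by_cases hr : q + 1 ∈ PySem.Set.discard S q <;>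
          simp only [solutionStep, PySem.Set.remove?_of_mem hqS,
            contains_eq_decide, hl, hr, decide_true, decide_false] <;>
          simp [hl, hr] at hd ⊢ <;> omega
    rw [List.foldl_cons, hstep,
      ih (PySem.Set.discard S q) _ (PySem.Set.nodup_discard S q hnd)
        hqnd.of_cons
        (fun q' hq' => (PySem.Set.mem_discard S q q').2
          ⟨hsub q' (by simp [hq']), fun hc => (List.nodup_cons.1 hqnd).1 (hc ▸ hq')⟩)]
    simp [trace]

-- B's reverse loop reconstructs `trace` back-to-front
theorem bLoop (qs : List Int) (S T : PySem.Set Int) (acc : List Int)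
    (hSnd : S.Nodup) (hTnd : T.Nodup) (hqnd : qs.Nodup) (hsub : ∀ q ∈ qs, q ∈ S)
    (hT : ∀ y, y ∈ T ↔ y ∈ S ∧ y ∉ qs) :
    ∃ U : PySem.Set Int, U.Nodup ∧ (∀ y, y ∈ U ↔ y ∈ S) ∧
      qs.reverse.foldl solutionAltStep (T, fseg T, acc) =
        (U, fseg U, acc ++ (trace S qs).reverse) := by
  induction qs generalizing S acc with
  | nil =>
    refine ⟨T, hTnd, fun y => ?_, by simp [trace]⟩
    rw [hT y]; simp
  | cons q qs ih =>
    have hqS : q ∈ S := hsub q (by simp)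
    have hqnotqs : q ∉ qs := (List.nodup_cons.1 hqnd).1
    obtain ⟨U, hUnd, hUmem, hfold⟩ :=
      ih (PySem.Set.discard S q) acc (PySem.Set.nodup_discard S q hSnd)
        hqnd.of_cons
        (fun q' hq' => (PySem.Set.mem_discard S q q').2
          ⟨hsub q' (by simp [hq']), fun hc => hqnotqs (hc ▸ hq')⟩)
        (fun y => by
          rw [hT y]
          simp only [PySem.Set.mem_discard S q y, List.mem_cons]
          constructor
          · rintro ⟨hyS, hy⟩; exact ⟨⟨hyS, fun hc => hy (Or.inl hc)⟩, fun hc => hy (Or.inr hc)⟩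
          · rintro ⟨⟨hyS, hyq⟩, hyqs⟩; exact ⟨hyS, by rintro (h | h); exacts [hyq h, hyqs h]⟩)
    have hqU : q ∉ U := fun hc => ((PySem.Set.mem_discard S q q).1 ((hUmem q).1 hc)).2 rfl
    have hfsegU : fseg U = fseg (PySem.Set.discard S q) := by
      refine fseg_perm ((List.perm_ext_iff_of_nodup hUnd
        (PySem.Set.nodup_discard S q hSnd)).2 hUmem)
    refine ⟨PySem.Set.add U q, PySem.Set.nodup_add U q hUnd, fun y => ?_, ?_⟩
    · rw [PySem.Set.mem_add U q y, hUmem y, PySem.Set.mem_discard S q y]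
      constructor
      · rintro (⟨h, _⟩ | rfl); exacts [h, hqS]
      · intro h; by_cases hy : y = q; exacts [Or.inr hy, Or.inl ⟨h, hy⟩]
    · rw [List.reverse_cons, List.foldl_append, hfold, List.foldl_cons, List.foldl_nil]
      have hadd : PySem.Set.add U q = U ++ [q] := PySem.Set.add_of_not_mem hqU
      have hstepB : solutionAltStep (U, fseg U, acc ++ (trace (PySem.Set.discard S q) qs).reverse) q =
          (PySem.Set.add U q,
           fseg U + (1 - (if PySem.Set.contains U (q - 1) then 1 else 0)
                       - (if PySem.Set.contains U (q + 1) then 1 else 0)),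
           (acc ++ (trace (PySem.Set.discard S q) qs).reverse) ++ [fseg U]) := rfl
      rw [hstepB]
      simp only [Prod.mk.injEq]
      refine ⟨trivial, ?_, ?_⟩
      · rw [contains_eq_decide, contains_eq_decide, hadd, fseg_append U q hUnd hqU]
        by_cases h1 : (q - 1) ∈ U <;> by_cases h2 : (q + 1) ∈ U <;> simp [h1, h2]
      · rw [hfsegU]
        simp [trace]

-- ---- initial count: A's sorted scan equals fseg (proved via a recursive reformulation) ----
def segRec : List Int → Int
  | [] => 0
  | [_] => 1
  | x :: y :: t => segRec (y :: t) + (if y - x > 1 then 1 else 0)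

theorem segRec_eq_one_add (l : List Int) (h : l ≠ []) :
    segRec l = 1 + ((List.range (l.length - 1)).countP
      (fun k => decide (l.getD (k + 1) 0 - l.getD k 0 > 1)) : Int) := by
  induction l using segRec.induct with
  | case1 => exact absurd rfl h
  | case2 x => simp [segRec]
  | case3 x y t ih =>
    have hlen : (x :: y :: t).length - 1 = t.length + 1 := by simp
    rw [segRec, ih (by simp), hlen, List.range_succ_eq_map, List.countP_cons,
      List.countP_map]
    have hshift : (List.range t.length).countP
        ((fun k => decide ((x :: y :: t).getD (k + 1) 0 - (x :: y :: t).getD k 0 > 1)) ∘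
          Nat.succ) =
        (List.range ((y :: t).length - 1)).countP
          (fun k => decide ((y :: t).getD (k + 1) 0 - (y :: t).getD k 0 > 1)) := by
      simp only [List.length_cons, Nat.add_sub_cancel]
      refine List.countP_congr ?_
      intro k _
      simp [Nat.succ_eq_add_one]
    rw [hshift]
    have hP0 : ((x :: y :: t).getD (0 + 1) 0 - (x :: y :: t).getD 0 0) = y - x := by simp
    rw [hP0]
    simp only [decide_eq_true_eq]
    split_ifs <;> push_cast <;> omega

theorem countSegments_eq_segRec (l : List Int) : countSegments l = segRec l := by
  by_cases h : l = []
  · subst h; simp [countSegments, segRec]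
  · unfold countSegments
    rw [if_neg h, segRec_eq_one_add l h]
    have hn : ((l.length : Int) - 1).toNat = l.length - 1 := by omega
    rw [PySem.List.len_eq, PySem.List.pyRange_one, List.foldl_map,
      PySem.List.foldl_ite_add_one
        (fun k : Nat => PySem.List.pyGetD l (1 + (k : Int)) 0 -
          PySem.List.pyGetD l (1 + (k : Int) - 1) 0 > 1), hn]
    have hc : (List.range (l.length - 1)).countP
        (fun x : Nat => decide (PySem.List.pyGetD l (1 + (x : Int)) 0 -
          PySem.List.pyGetD l (1 + (x : Int) - 1) 0 > 1)) =
        (List.range (l.length - 1)).countP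
          (fun k => decide (l.getD (k + 1) 0 - l.getD k 0 > 1)) := by
      refine List.countP_congr ?_
      intro k _
      have e1 : (1 : Int) + (k : Int) = ((k + 1 : Nat) : Int) := by omega
      have e2 : ((k + 1 : Nat) : Int) - 1 = ((k : Nat) : Int) := by omega
      rw [e1, e2, PySem.List.pyGetD_natCast, PySem.List.pyGetD_natCast]
    rw [hc]

-- sorted dedup of a ≤-sorted list
def sdl : List Int → List Int
  | [] => []
  | [x] => [x]
  | x :: y :: t => if x = y then sdl (y :: t) else x :: sdl (y :: t)

theorem sdl_eq_of_eq (y : Int) (t : List Int) : sdl (y :: y :: t) = sdl (y :: t) := by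
  simp [sdl]

theorem sdl_eq_of_ne {x y : Int} (t : List Int) (h : x ≠ y) :
    sdl (x :: y :: t) = x :: sdl (y :: t) := by
  simp [sdl, h]

theorem mem_sdl (l : List Int) (z : Int) : z ∈ sdl l ↔ z ∈ l := by
  induction l using sdl.induct with
  | case1 => simp [sdl]
  | case2 x => simp [sdl]
  | case3 y t ih =>
    rw [sdl_eq_of_eq, ih]
    simp [List.mem_cons]
  | case4 x y t hne ih =>
    rw [sdl_eq_of_ne t hne]
    simp [List.mem_cons, ih]

theorem sdl_cons (a : Int) (t : List Int) : ∃ r, sdl (a :: t) = a :: r := by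
  induction t generalizing a with
  | nil => exact ⟨[], rfl⟩
  | cons y t' ih =>
    by_cases h : a = y
    · obtain ⟨r, hr⟩ := ih y
      exact ⟨r, by subst h; simpa [sdl] using hr⟩
    · exact ⟨sdl (y :: t'), by simp [sdl, h]⟩

theorem sdl_pairwise (l : List Int) (h : l.Pairwise (· ≤ ·)) :
    (sdl l).Pairwise (· < ·) := by
  revert h
  induction l using sdl.induct with
  | case1 => simp [sdl]
  | case2 x => simp [sdl]
  | case3 y t ih =>
    intro h
    rw [sdl_eq_of_eq]
    exact ih (List.pairwise_cons.1 h).2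
  | case4 x y t hne ih =>
    intro h
    rw [List.pairwise_cons] at h
    obtain ⟨hx, hp⟩ := h
    rw [sdl_eq_of_ne t hne, List.pairwise_cons]
    refine ⟨?_, ih hp⟩
    intro z hz
    rw [mem_sdl] at hz
    have hxy : x < y := lt_of_le_of_ne (hx y (by simp)) hne
    rcases List.mem_cons.1 hz with h' | h'
    · omega
    · have : y ≤ z := (List.pairwise_cons.1 hp).1 z h'
      omega

theorem segRec_sdl (l : List Int) (h : l.Pairwise (· ≤ ·)) : segRec l = segRec (sdl l) := by
  revert h
  induction l using sdl.induct with
  | case1 => simp [sdl]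
  | case2 x => simp [sdl]
  | case3 y t ih =>
    intro h
    rw [sdl_eq_of_eq, segRec, ← ih (List.pairwise_cons.1 h).2]
    norm_num
  | case4 x y t hne ih =>
    intro h
    rw [List.pairwise_cons] at h
    obtain ⟨hx, hp⟩ := h
    obtain ⟨r, hr⟩ := sdl_cons y t
    rw [sdl_eq_of_ne t hne, hr, segRec, segRec, ← hr, ← ih hp]

-- the pairing formula on a strictly increasing list
theorem segRec_chain (d : List Int) (h : d.Pairwise (· < ·)) : segRec d = fseg d := by
  unfold fseg
  induction d with
  | nil => simp [segRec]
  | cons x t ih =>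
    rw [List.pairwise_cons] at h
    obtain ⟨hx, hp⟩ := h
    have hcong : t.countP (fun z => decide ((z + 1) ∈ x :: t)) =
        t.countP (fun z => decide ((z + 1) ∈ t)) := by
      refine List.countP_congr ?_
      intro z hz
      have := hx z hz
      simp only [decide_eq_true_eq, List.mem_cons]
      constructor
      · rintro (h' | h')
        · omega
        · exact h'
      · exact fun h' => Or.inr h'
    rw [List.countP_cons, hcong]
    cases t with
    | nil => simp [segRec]
    | cons y t' =>
      have hxy : x < y := hx y (by simp)
      have hy : ∀ z ∈ t', y < z := (List.pairwise_cons.1 hp).1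
      have hmem : (x + 1) ∈ y :: t' ↔ y = x + 1 := by
        constructor
        · intro hm
          rcases List.mem_cons.1 hm with h' | h'
          · omega
          · have := hy _ h'; omega
        · intro h'; simp [h']
      have hx1 : ((x + 1) ∈ x :: y :: t') ↔ y = x + 1 := by
        rw [List.mem_cons]
        constructor
        · rintro (h' | h')
          · omega
          · exact hmem.1 h'
        · intro h'; exact Or.inr (hmem.2 h')
      rw [segRec, ih hp]
      by_cases hcase : y = x + 1
      · subst hcase
        simp [hx1]
      · simp [hx1, hcase]
        split_ifs <;> omega

-- A's initial count equals fseg of set(houses) (houses already sorted)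
theorem countSegments_eq_fseg (l : List Int) (h : l.Pairwise (· ≤ ·)) :
    countSegments l = fseg (PySem.Set.ofList l) := by
  have hnd : (sdl l).Nodup := (sdl_pairwise l h).imp ne_of_lt
  have hperm : (sdl l).Perm (PySem.Set.ofList l) :=
    (List.perm_ext_iff_of_nodup hnd (PySem.Set.nodup_ofList l)).2
      (fun a => by rw [mem_sdl, PySem.Set.mem_ofList])
  rw [countSegments_eq_segRec, segRec_sdl l h, segRec_chain _ (sdl_pairwise l h),
    fseg_perm hperm]

-- B's initial count equals fseg of its starting set
theorem segInit_eq_fseg (T : PySem.Set Int) :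
    PySem.Set.len T -
      T.foldl (fun acc x => if PySem.Set.contains T (x + 1) then acc + 1 else acc) 0 =
    fseg T := by
  rw [PySem.List.foldl_if_add_one (fun x => PySem.Set.contains T (x + 1)),
    List.countP_congr (l := T) (q := fun x => decide ((x + 1) ∈ T))
      (fun x _ => by rw [contains_eq_decide])]
  unfold fseg PySem.Set.len
  omega

-- B's removal phase reaches the set of houses minus the queries
theorem removeAll_spec (qs : List Int) (S : PySem.Set Int)
    (hnd : S.Nodup) (hqnd : qs.Nodup) (hsub : ∀ q ∈ qs, q ∈ S) :
    (qs.foldl (fun s q =>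
        match PySem.Set.remove? s q with
        | none => s
        | some t => t) S).Nodup ∧
    ∀ y, y ∈ qs.foldl (fun s q =>
        match PySem.Set.remove? s q with
        | none => s
        | some t => t) S ↔ y ∈ S ∧ y ∉ qs := by
  induction qs generalizing S with
  | nil => exact ⟨hnd, by simp⟩
  | cons q qs ih =>
    have hqS : q ∈ S := hsub q (by simp)
    have hqnotqs : q ∉ qs := (List.nodup_cons.1 hqnd).1
    rw [List.foldl_cons]
    simp only [PySem.Set.remove?_of_mem hqS]
    obtain ⟨h1, h2⟩ := ih (PySem.Set.discard S q) (PySem.Set.nodup_discard S q hnd)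
      hqnd.of_cons
      (fun q' hq' => (PySem.Set.mem_discard S q q').2
        ⟨hsub q' (by simp [hq']), fun hc => hqnotqs (hc ▸ hq')⟩)
    refine ⟨h1, fun y => ?_⟩
    rw [h2 y, PySem.Set.mem_discard S q y, List.mem_cons]
    constructor
    · rintro ⟨⟨hyS, hyq⟩, hyqs⟩; exact ⟨hyS, by rintro (h | h); exacts [hyq h, hyqs h]⟩
    · rintro ⟨hyS, hy⟩; exact ⟨⟨hyS, fun hc => hy (Or.inl hc)⟩, fun hc => hy (Or.inr hc)⟩

-- ===== VERDICT (by name: the statements are the Claim_ definitions above) =====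
theorem solution_spec : Claim_equal_solution := by
  intro houses queries _ hpre
  obtain ⟨hqnd, hsubh⟩ := hpre
  unfold Spec_solution solution solution_alt
  dsimp only
  have hperm := PySem.List.sorted_perm houses (fun x => x) false
  set SH := PySem.List.sorted houses (fun x => x) false with hSH
  set S := PySem.Set.ofList SH with hS
  set T := queries.foldl (fun s q =>
    match PySem.Set.remove? s q with
    | none => s
    | some t => t) (PySem.Set.ofList houses) with hT
  have hSnd : S.Nodup := PySem.Set.nodup_ofList SH
  have hra := removeAll_spec queries (PySem.Set.ofList houses)
    (PySem.Set.nodup_ofList houses) hqnd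
    (fun q hq => (PySem.Set.mem_ofList houses q).2 (hsubh q hq))
  have hTnd : T.Nodup := hra.1
  have hsub : ∀ q ∈ queries, q ∈ S := fun q hq => by
    rw [hS, PySem.Set.mem_ofList SH q, hperm.mem_iff]; exact hsubh q hq
  have hTmem : ∀ y, y ∈ T ↔ y ∈ S ∧ y ∉ queries := by
    intro y
    rw [hT, hra.2 y, PySem.Set.mem_ofList houses y, hS, PySem.Set.mem_ofList SH y,
      hperm.mem_iff]
  obtain ⟨U, _, _, hfold⟩ := bLoop queries S T [] hSnd hTnd hqnd hsub hTmem
  rw [countSegments_eq_fseg SH (by rw [hSH]; exact PySem.List.sorted_pairwise houses (fun x => x)),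
    aLoop queries S [] hSnd hqnd hsub, segInit_eq_fseg T, hfold]
  simp
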